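-- pv_equiv track=rewrite | github.com/gns9541/prac | pythonProject/230403/연산.py | bfs
-- ===== SOURCE A (Python) =====
-- from collections import deque
--
-- def bfs(s,e):
--     v=[0]*(1000001)
--     q=deque()
--     v[s]=1
--     q.append(s)
--     while q:
--         c = q.popleft()
--         if c==e:
--             return v[e]-1
--         for t in ((c+1),(c-1),(c*2),(c-10)):
--             if 1<=t<=1000000 and v[t]==0:
--                 q.append(t)
--                 v[t]=v[c]+1
-- ===== SOURCE B (Python) =====
-- def bfs(s, e):
--     v = bytearray(1000001)
--     v[s] = 1
--     frontier = [s]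
--     dist = 0
--     while frontier:
--         if e in frontier:
--             return dist
--         cand = [t for c in frontier for t in (c + 1, c - 1, 2 * c, c - 10)]
--         nxt = []
--         for t in cand:
--             if 1 <= t <= 1000000 and not v[t]:
--                 v[t] = 1
--                 nxt.append(t)
--         frontier = nxt
--         dist += 1
--     return None
-- ===== Notes on version B (the rewrite author's own statement) =====
-- stated objective: alternative
-- what changed: A's node-at-a-time deque BFS that stores each node's distance in the visited list and returns v[e]-1 when popping e is replaced by a staged level-synchronous BFS: per distance level it first flattens all four neighbours of the whole frontier into one candidate list, then a second pass filters/marks them in a 0/1 bytearray, returning an integer level counter when e appears in the frontier.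
import Mathlib
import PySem

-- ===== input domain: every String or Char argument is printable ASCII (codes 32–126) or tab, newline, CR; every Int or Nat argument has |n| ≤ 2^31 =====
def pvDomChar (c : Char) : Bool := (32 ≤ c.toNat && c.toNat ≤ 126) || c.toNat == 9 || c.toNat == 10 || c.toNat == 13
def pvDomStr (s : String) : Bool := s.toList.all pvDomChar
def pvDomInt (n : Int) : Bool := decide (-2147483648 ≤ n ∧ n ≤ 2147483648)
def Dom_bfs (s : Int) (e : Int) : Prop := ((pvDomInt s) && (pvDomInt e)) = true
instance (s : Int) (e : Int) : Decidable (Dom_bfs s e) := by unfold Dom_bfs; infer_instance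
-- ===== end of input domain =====

-- B replaces A's node-at-a-time deque BFS (each node's distance stored in the visited
-- list, returned as v[e]-1 when e is popped) by a staged level-synchronous BFS: per
-- distance level it flattens all four neighbours of the whole frontier into one
-- candidate list, then a second pass filters and marks them in a 0/1 bytearray,
-- returning an integer level counter when e appears in the frontier; objective: alternative.

-- ===== PORT A =====
-- Python list indexing v[i] on the size-1000001 list: a negative index wraps
-- (exact for -1000001 <= i; indices outside that raise IndexError, excluded by Pre_).
def pyIdx (i : Int) : Nat := (if i < 0 then i + 1000001 else i).toNat

-- one neighbour step of A's inner `for t in (c+1, c-1, c*2, c-10)` loop: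
-- mark v[t] = v[c]+1 and enqueue t (the queue's back is a reversed list, see runA)
def nbF (c : Int) (st : Array Int × List Int) (t : Int) : Array Int × List Int :=
  if 1 ≤ t ∧ t ≤ 1000000 ∧ st.1.getD t.toNat 0 = 0 then
    (st.1.setIfInBounds t.toNat (st.1.getD (pyIdx c) 0 + 1), t :: st.2)
  else st

def stepA (v : Array Int) (bk : List Int) (c : Int) : Array Int × List Int :=
  [c + 1, c - 1, c * 2, c - 10].foldl (nbF c) (v, bk)

-- A's `while q:` loop. The deque is ported as the standard two-list FIFO
-- (front list + reversed back list: the same nodes are popped in the same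
-- order as from Python's deque; a one-list queue would make appends quadratic).
-- One node is popped per iteration and each of the 1000001 cells is enqueued at
-- most once, so fuel 2000003 is never exhausted (lemmas below never use the
-- fuel-0 branch on the claimed inputs).
def runA (e : Int) : Nat → Array Int → List Int → List Int → Option Int
  | 0, _, _, _ => none
  | f + 1, v, c :: fr, bk =>
    if c = e then some (v.getD (pyIdx c) 0 - 1)
    else
      let st := stepA v bk c
      runA e f st.1 fr st.2
  | f + 1, v, [], bk =>
    match bk.reverse with
    | [] => none
    | c :: fr =>
      if c = e then some (v.getD (pyIdx c) 0 - 1)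
      else
        let st := stepA v [] c
        runA e f st.1 fr st.2

def bfs (s : Int) (e : Int) : Option Int :=
  runA e 2000003 ((Array.replicate 1000001 (0 : Int)).setIfInBounds (pyIdx s) 1) [s] []

-- ===== PORT B =====
-- Source B's candidate comprehension: all four neighbours of every frontier node, flattened
def neighbors (c : Int) : List Int := [c + 1, c - 1, 2 * c, c - 10]

def nextCand (fr : List Int) : List Int := fr.flatMap neighbors

-- Source B's second pass `for t in cand: if 1 <= t <= 1000000 and not v[t]: ...`
-- over the 0/1 bytearray, appending to nxt in order
def markF (st : Array Nat × List Int) (t : Int) : Array Nat × List Int :=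
  if 1 ≤ t ∧ t ≤ 1000000 ∧ st.1.getD t.toNat 0 = 0 then
    (st.1.setIfInBounds t.toNat 1, st.2 ++ [t])
  else st

def markAll (v : Array Nat) (cand : List Int) : Array Nat × List Int :=
  cand.foldl markF (v, [])

-- Source B's `while frontier:` loop, one iteration per distance level; at most
-- 1000001 nonempty levels exist, so fuel 1000002 is never exhausted.
def runB (e : Int) : Nat → Array Nat → Int → List Int → Option Int
  | 0, _, _, _ => none
  | f + 1, v, d, fr =>
    if fr = [] then none
    else if e ∈ fr then some d
    else
      let st := markAll v (nextCand fr)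
      runB e f st.1 (d + 1) st.2

def bfs_alt (s : Int) (e : Int) : Option Int :=
  runB e 1000002 ((Array.replicate 1000001 (0 : Nat)).setIfInBounds (pyIdx s) 1) 0 [s]

-- ===== PRECONDITION & SPEC =====
-- Pre_ excludes exactly the starts s on which Python A raises IndexError at
-- `v[s] = 1` (s > 1000000 or s < -1000001); on every admitted s, including the
-- negative ones that Python's indexing wraps around, A returns and B matches it.
def Pre_bfs (s : Int) (e : Int) : Prop := -1000001 ≤ s ∧ s ≤ 1000000
instance (s : Int) (e : Int) : Decidable (Pre_bfs s e) := by unfold Pre_bfs; infer_instance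
def pvWitness_bfs : Int × Int := (5, 17)

def Spec_bfs (s : Int) (e : Int) (out : Option Int) : Prop := out = bfs_alt s e
instance (s : Int) (e : Int) (out : Option Int) : Decidable (Spec_bfs s e out) := by unfold Spec_bfs; infer_instance

-- ===== CLAIM (what is proved, stated in full; the proofs are below) =====
def Claim_equal_bfs : Prop := ∀ (s : Int) (e : Int), Dom_bfs s e → Pre_bfs s e → Spec_bfs s e (bfs s e)

-- ===== LEMMAS AND PROOFS =====

-- number of unvisited (zero) cells of A's array, for fuel bookkeeping
def Zc (v : Array Int) : Nat := ((Finset.range 1000001).filter (fun j => v.getD j 0 = 0)).card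

lemma getD_setIfInBounds {α : Type} (v : Array α) (i j : Nat) (x y : α) :
    (v.setIfInBounds i x).getD j y = if i = j ∧ i < v.size then x else v.getD j y := by
  rw [Array.getD_eq_getD_getElem?, Array.getD_eq_getD_getElem?, Array.getElem?_setIfInBounds]
  by_cases h1 : i = j <;> by_cases h2 : i < v.size <;>
    simp_all [show ∀ _ : ¬ i < v.size, i = j → ¬ j < v.size from by omega]

lemma nbF_acc (c : Int) (ns : List Int) :
    ∀ (v : Array Int) (acc : List Int),
      ns.foldl (nbF c) (v, acc) = ((ns.foldl (nbF c) (v, [])).1, (ns.foldl (nbF c) (v, [])).2 ++ acc) := by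
  induction ns with
  | nil => intro v acc; simp
  | cons t ns ih =>
    intro v acc
    by_cases h : 1 ≤ t ∧ t ≤ 1000000 ∧ v.getD t.toNat 0 = 0
    · simp only [List.foldl_cons, nbF, if_pos h]
      rw [ih _ (t :: acc), ih _ (t :: ([] : List Int))]
      simp
    · simp only [List.foldl_cons, nbF, if_neg h]
      exact ih v acc

lemma markF_acc (ns : List Int) :
    ∀ (v : Array Nat) (acc : List Int),
      ns.foldl markF (v, acc) = ((ns.foldl markF (v, [])).1, acc ++ (ns.foldl markF (v, [])).2) := by
  induction ns with
  | nil => intro v acc; simp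
  | cons t ns ih =>
    intro v acc
    by_cases h : 1 ≤ t ∧ t ≤ 1000000 ∧ v.getD t.toNat 0 = 0
    · simp only [List.foldl_cons, markF, if_pos h]
      rw [ih _ (acc ++ [t]), ih _ (([] : List Int) ++ [t])]
      simp
    · simp only [List.foldl_cons, markF, if_neg h]
      exact ih v acc

lemma Zc_set (v : Array Int) (j0 : Nat) (hj : j0 < 1000001) (hsz : v.size = 1000001)
    (h0 : v.getD j0 0 = 0) (x : Int) (hx : x ≠ 0) :
    Zc (v.setIfInBounds j0 x) + 1 = Zc v := by
  have hfil : (Finset.range 1000001).filter (fun j => (v.setIfInBounds j0 x).getD j 0 = 0)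
      = ((Finset.range 1000001).filter (fun j => v.getD j 0 = 0)).erase j0 := by
    ext j
    simp only [Finset.mem_erase, Finset.mem_filter, Finset.mem_range, getD_setIfInBounds, hsz]
    by_cases hjj : j0 = j
    · subst hjj; simp [hj, hx]
    · simp [hjj, Ne.symm hjj]
  have hmem : j0 ∈ (Finset.range 1000001).filter (fun j => v.getD j 0 = 0) := by
    simp only [Finset.mem_filter, Finset.mem_range]
    exact ⟨hj, h0⟩
  unfold Zc
  rw [hfil, Finset.card_erase_of_mem hmem]
  have : 0 < ((Finset.range 1000001).filter (fun j => v.getD j 0 = 0)).card :=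
    Finset.card_pos.2 ⟨j0, hmem⟩
  omega

lemma neighbors_eq (c : Int) : neighbors c = [c + 1, c - 1, c * 2, c - 10] := by
  simp [neighbors, Int.mul_comm]

-- per-node joint simulation: A's cons-accumulating distance-marking fold over the
-- neighbour tuple versus B's append-accumulating 0/1-marking fold over the same tuple
lemma nodeJoint (d : Int) (hd : 0 ≤ d) (c : Int) (ns : List Int) :
    ∀ (vA : Array Int) (vB : Array Nat),
      vA.size = 1000001 → vB.size = 1000001 →
      (∀ j, j < 1000001 → (vA.getD j 0 = 0 ↔ vB.getD j 0 = 0)) →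
      vA.getD (pyIdx c) 0 = d + 1 →
      (ns.foldl (nbF c) (vA, [])).2.reverse = (ns.foldl markF (vB, [])).2
      ∧ (ns.foldl (nbF c) (vA, [])).1.size = 1000001
      ∧ (ns.foldl markF (vB, [])).1.size = 1000001
      ∧ (∀ j, j < 1000001 →
          ((ns.foldl (nbF c) (vA, [])).1.getD j 0 = 0 ↔ (ns.foldl markF (vB, [])).1.getD j 0 = 0))
      ∧ (∀ j, vA.getD j 0 ≠ 0 → (ns.foldl (nbF c) (vA, [])).1.getD j 0 = vA.getD j 0)
      ∧ (∀ t ∈ (ns.foldl (nbF c) (vA, [])).2,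
          1 ≤ t ∧ t ≤ 1000000 ∧ (ns.foldl (nbF c) (vA, [])).1.getD t.toNat 0 = d + 2)
      ∧ Zc (ns.foldl (nbF c) (vA, [])).1 + (ns.foldl (nbF c) (vA, [])).2.length = Zc vA := by
  induction ns with
  | nil =>
    intro vA vB hsA hsB hpat hc
    exact ⟨rfl, hsA, hsB, hpat, fun j _ => rfl, by simp, by simp⟩
  | cons t ns ih =>
    intro vA vB hsA hsB hpat hc
    have hd2 : (d : Int) + 2 ≠ 0 := by omega
    have hd1 : (d : Int) + 1 ≠ 0 := by omega
    by_cases hA : 1 ≤ t ∧ t ≤ 1000000 ∧ vA.getD t.toNat 0 = 0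
    · have htn : t.toNat < 1000001 := by omega
      have hB : 1 ≤ t ∧ t ≤ 1000000 ∧ vB.getD t.toNat 0 = 0 :=
        ⟨hA.1, hA.2.1, (hpat t.toNat htn).1 hA.2.2⟩
      set vA' := vA.setIfInBounds t.toNat (vA.getD (pyIdx c) 0 + 1) with hvA'
      set vB' := vB.setIfInBounds t.toNat 1 with hvB'
      have hsA' : vA'.size = 1000001 := by rw [hvA', Array.size_setIfInBounds]; exact hsA
      have hsB' : vB'.size = 1000001 := by rw [hvB', Array.size_setIfInBounds]; exact hsB
      have hgetA' : ∀ j, vA'.getD j 0 = if t.toNat = j then d + 2 else vA.getD j 0 := by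
        intro j
        rw [hvA', getD_setIfInBounds, hc]
        by_cases hj : t.toNat = j
        · subst hj; simp only [hsA, htn, if_pos, and_self]; ring
        · simp [hj]
      have hgetB' : ∀ j, vB'.getD j 0 = if t.toNat = j then 1 else vB.getD j 0 := by
        intro j
        rw [hvB', getD_setIfInBounds]
        by_cases hj : t.toNat = j
        · subst hj; simp [hsB, htn]
        · simp [hj]
      have hpat' : ∀ j, j < 1000001 → (vA'.getD j 0 = 0 ↔ vB'.getD j 0 = 0) := by
        intro j hj
        rw [hgetA', hgetB']
        by_cases hj' : t.toNat = j
        · rw [if_pos hj', if_pos hj']; simp [hd2]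
        · rw [if_neg hj', if_neg hj']; exact hpat j hj
      have hc' : vA'.getD (pyIdx c) 0 = d + 1 := by
        rw [hgetA']
        by_cases hj' : t.toNat = pyIdx c
        · exfalso; rw [hj'] at hA; rw [hA.2.2] at hc; omega
        · simp [hj', hc]
      obtain ⟨iha, ihsA, ihsB, ihpat, ihpres, ihch, ihZ⟩ := ih vA' vB' hsA' hsB' hpat' hc'
      have unfA : (t :: ns).foldl (nbF c) (vA, [])
          = ((ns.foldl (nbF c) (vA', [])).1, (ns.foldl (nbF c) (vA', [])).2 ++ [t]) := by
        have h1 : (t :: ns).foldl (nbF c) (vA, ([] : List Int)) = ns.foldl (nbF c) (vA', [t]) := by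
          simp only [List.foldl_cons, nbF, if_pos hA]
          rfl
        rw [h1, nbF_acc]
      have unfB : (t :: ns).foldl markF (vB, [])
          = ((ns.foldl markF (vB', [])).1, t :: (ns.foldl markF (vB', [])).2) := by
        have h1 : (t :: ns).foldl markF (vB, ([] : List Int)) = ns.foldl markF (vB', [t]) := by
          simp only [List.foldl_cons, markF, if_pos hB]
          rfl
        rw [h1, markF_acc]
        simp
      rw [unfA, unfB]
      have hZ' : Zc vA' + 1 = Zc vA := Zc_set vA t.toNat htn hsA hA.2.2 _ (by rw [hc]; omega)
      refine ⟨by simp [iha], ihsA, ihsB, ihpat, ?_, ?_, ?_⟩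
      · intro j hjnz
        have hjne : t.toNat ≠ j := by
          intro hjj; rw [← hjj] at hjnz; exact hjnz hA.2.2
        have : vA'.getD j 0 = vA.getD j 0 := by rw [hgetA', if_neg hjne]
        rw [ihpres j (by rw [this]; exact hjnz), this]
      · intro u hu
        rcases List.mem_append.1 hu with hu | hu
        · exact ihch u hu
        · have hut : u = t := by simpa using hu
          subst hut
          have hA't : vA'.getD u.toNat 0 = d + 2 := by rw [hgetA', if_pos rfl]
          refine ⟨hA.1, hA.2.1, ?_⟩
          rw [ihpres u.toNat (by rw [hA't]; exact hd2), hA't]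
      · simp only [List.length_append, List.length_cons, List.length_nil]
        omega
    · have hB : ¬ (1 ≤ t ∧ t ≤ 1000000 ∧ vB.getD t.toNat 0 = 0) := by
        intro hB
        exact hA ⟨hB.1, hB.2.1, (hpat t.toNat (by omega)).2 hB.2.2⟩
      have unfA : (t :: ns).foldl (nbF c) (vA, ([] : List Int)) = ns.foldl (nbF c) (vA, []) := by
        simp only [List.foldl_cons, nbF, if_neg hA]
      have unfB : (t :: ns).foldl markF (vB, ([] : List Int)) = ns.foldl markF (vB, []) := by
        simp only [List.foldl_cons, markF, if_neg hB]
      rw [unfA, unfB]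
      exact ih vA vB hsA hsB hpat hc

lemma stepA_acc (v : Array Int) (bk : List Int) (c : Int) :
    stepA v bk c = ((stepA v [] c).1, (stepA v [] c).2 ++ bk) := by
  unfold stepA
  exact nbF_acc c _ v bk

def procA (v : Array Int) (fr : List Int) : Array Int × List Int :=
  fr.foldl (fun st c => stepA st.1 st.2 c) (v, [])

lemma procA_acc (fr : List Int) :
    ∀ (v : Array Int) (acc : List Int),
    fr.foldl (fun st c => stepA st.1 st.2 c) (v, acc)
      = ((procA v fr).1, (procA v fr).2 ++ acc) := by
  induction fr with
  | nil => intro v acc; simp [procA]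
  | cons c fr ih =>
    intro v acc
    have h0 : procA v (c :: fr)
        = ((procA (stepA v [] c).1 fr).1, (procA (stepA v [] c).1 fr).2 ++ (stepA v [] c).2) := by
      show (fr.foldl (fun st c => stepA st.1 st.2 c) (stepA v [] c)) = _
      rw [show stepA v [] c = ((stepA v [] c).1, (stepA v [] c).2) from rfl]
      exact ih _ _
    calc (c :: fr).foldl (fun st c => stepA st.1 st.2 c) (v, acc)
        = fr.foldl (fun st c => stepA st.1 st.2 c) (stepA v acc c) := by rfl
      _ = fr.foldl (fun st c => stepA st.1 st.2 c) ((stepA v [] c).1, (stepA v [] c).2 ++ acc) := by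
          rw [← stepA_acc]
      _ = ((procA (stepA v [] c).1 fr).1, (procA (stepA v [] c).1 fr).2 ++ ((stepA v [] c).2 ++ acc)) :=
          ih _ _
      _ = ((procA v (c :: fr)).1, (procA v (c :: fr)).2 ++ acc) := by
          rw [h0]; simp

-- level joint simulation: A's whole level (fold of stepA over the frontier) versus
-- B's staged level (flatten the candidates, then one marking pass)
lemma levelJoint (d : Int) (hd : 0 ≤ d) :
    ∀ (fr : List Int) (vA : Array Int) (vB : Array Nat),
      vA.size = 1000001 → vB.size = 1000001 →
      (∀ j, j < 1000001 → (vA.getD j 0 = 0 ↔ vB.getD j 0 = 0)) →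
      (∀ c ∈ fr, pyIdx c < 1000001 ∧ vA.getD (pyIdx c) 0 = d + 1) →
      (procA vA fr).2.reverse = (markAll vB (nextCand fr)).2
      ∧ (procA vA fr).1.size = 1000001
      ∧ (markAll vB (nextCand fr)).1.size = 1000001
      ∧ (∀ j, j < 1000001 →
          ((procA vA fr).1.getD j 0 = 0 ↔ (markAll vB (nextCand fr)).1.getD j 0 = 0))
      ∧ (∀ j, vA.getD j 0 ≠ 0 → (procA vA fr).1.getD j 0 = vA.getD j 0)
      ∧ (∀ t ∈ (procA vA fr).2,
          1 ≤ t ∧ t ≤ 1000000 ∧ (procA vA fr).1.getD t.toNat 0 = d + 2)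
      ∧ Zc (procA vA fr).1 + (procA vA fr).2.length = Zc vA := by
  intro fr
  induction fr with
  | nil =>
    intro vA vB hsA hsB hpat _
    exact ⟨rfl, hsA, hsB, hpat, fun j _ => rfl, by simp [procA], by simp [procA]⟩
  | cons c fr ih =>
    intro vA vB hsA hsB hpat hfr
    have hc := hfr c (List.mem_cons_self)
    obtain ⟨na, nsA, nsB, npat, npres, nch, nZ⟩ :=
      nodeJoint d hd c [c + 1, c - 1, c * 2, c - 10] vA vB hsA hsB hpat hc.2
    set v1 := (stepA vA [] c).1 with hv1
    set w1 := ([c + 1, c - 1, c * 2, c - 10].foldl markF (vB, ([] : List Int))).1 with hw1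
    have ev1 : stepA vA [] c = [c + 1, c - 1, c * 2, c - 10].foldl (nbF c) (vA, []) := rfl
    -- unfold one node of procA
    have hpA : procA vA (c :: fr)
        = ((procA v1 fr).1, (procA v1 fr).2 ++ (stepA vA [] c).2) := by
      show (fr.foldl (fun st c => stepA st.1 st.2 c) (stepA vA [] c)) = _
      rw [show stepA vA [] c = ((stepA vA [] c).1, (stepA vA [] c).2) from rfl]
      exact procA_acc fr _ _
    -- unfold one node of B's staged level: cand (c :: fr) = neighbors c ++ cand fr
    have hpB : markAll vB (nextCand (c :: fr))
        = ((markAll w1 (nextCand fr)).1,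
           ([c + 1, c - 1, c * 2, c - 10].foldl markF (vB, ([] : List Int))).2
             ++ (markAll w1 (nextCand fr)).2) := by
      have h1 : nextCand (c :: fr) = [c + 1, c - 1, c * 2, c - 10] ++ nextCand fr := by
        simp only [nextCand, List.flatMap_cons, neighbors_eq]
      rw [markAll, h1, List.foldl_append]
      rw [show [c + 1, c - 1, c * 2, c - 10].foldl markF (vB, ([] : List Int))
          = (([c + 1, c - 1, c * 2, c - 10].foldl markF (vB, ([] : List Int))).1,
             ([c + 1, c - 1, c * 2, c - 10].foldl markF (vB, ([] : List Int))).2) from rfl]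
      rw [markF_acc]
      rfl
    have hpres1 : ∀ j, vA.getD j 0 ≠ 0 → v1.getD j 0 = vA.getD j 0 := by
      intro j hj; rw [hv1, ev1]; exact npres j hj
    have hd1 : (d : Int) + 1 ≠ 0 := by omega
    have hd2 : (d : Int) + 2 ≠ 0 := by omega
    have hfr' : ∀ c' ∈ fr, pyIdx c' < 1000001 ∧ v1.getD (pyIdx c') 0 = d + 1 := by
      intro c' hc'
      have h := hfr c' (List.mem_cons_of_mem _ hc')
      exact ⟨h.1, by rw [hpres1 _ (by rw [h.2]; exact hd1)]; exact h.2⟩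
    obtain ⟨iha, ihsA, ihsB, ihpat, ihpres, ihch, ihZ⟩ :=
      ih v1 w1 (by rw [hv1, ev1]; exact nsA) (by rw [hw1]; exact nsB)
        (by rw [hv1, ev1, hw1]; exact npat) hfr'
    rw [hpA, hpB]
    refine ⟨?_, ihsA, ihsB, ihpat, ?_, ?_, ?_⟩
    · show ((procA v1 fr).2 ++ (stepA vA [] c).2).reverse = _
      rw [List.reverse_append, iha, ev1, na]
    · intro j hj
      rw [ihpres j (by rw [hpres1 j hj]; exact hj), hpres1 j hj]
    · intro t ht
      rcases List.mem_append.1 ht with ht | ht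
      · exact ihch t ht
      · rw [ev1] at ht
        obtain ⟨h1, h2, h3⟩ := nch t ht
        rw [← ev1, ← hv1] at h3
        exact ⟨h1, h2, by rw [ihpres t.toNat (by rw [h3]; exact hd2), h3]⟩
    · have nZ' : Zc v1 + (stepA vA [] c).2.length = Zc vA := by
        rw [hv1, ev1]; exact nZ
      simp only [List.length_append]
      omega

def runAbsA (e : Int) : Nat → Array Int → List Int → Option Int
  | 0, _, _ => none
  | _ + 1, _, [] => none
  | f + 1, v, c :: q =>
    if c = e then some (v.getD (pyIdx c) 0 - 1)
    else runAbsA e f (stepA v [] c).1 (q ++ (stepA v [] c).2.reverse)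

lemma runA_eq_runAbsA (e : Int) :
    ∀ (f : Nat) (v : Array Int) (fr bk : List Int),
      runA e f v fr bk = runAbsA e f v (fr ++ bk.reverse) := by
  intro f
  induction f with
  | zero => intro v fr bk; rfl
  | succ f ih =>
    intro v fr bk
    match fr with
    | c :: fr =>
      show (if c = e then some (v.getD (pyIdx c) 0 - 1) else runA e f (stepA v bk c).1 fr (stepA v bk c).2)
          = (if c = e then some (v.getD (pyIdx c) 0 - 1)
             else runAbsA e f (stepA v [] c).1 ((fr ++ bk.reverse) ++ (stepA v [] c).2.reverse))
      by_cases hc : c = e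
      · simp [hc]
      · rw [if_neg hc, if_neg hc, stepA_acc, ih]
        simp [List.append_assoc]
    | [] =>
      show (match bk.reverse with
            | [] => none
            | c :: fr =>
              if c = e then some (v.getD (pyIdx c) 0 - 1)
              else runA e f (stepA v [] c).1 fr (stepA v [] c).2) = runAbsA e (f + 1) v ([] ++ bk.reverse)
      match hrev : bk.reverse with
      | [] => rfl
      | c :: fr2 =>
        show (if c = e then some (v.getD (pyIdx c) 0 - 1)
              else runA e f (stepA v [] c).1 fr2 (stepA v [] c).2)
            = runAbsA e (f + 1) v (c :: fr2)
        by_cases hc : c = e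
        · simp [runAbsA, hc]
        · rw [if_neg hc, ih]
          show _ = runAbsA e (f+1) v (c :: fr2)
          rw [show runAbsA e (f+1) v (c :: fr2)
              = runAbsA e f (stepA v [] c).1 (fr2 ++ (stepA v [] c).2.reverse) from by
            simp [runAbsA, hc]]

lemma runAbsA_consume (e : Int) :
    ∀ (a : List Int) (f : Nat) (v : Array Int) (q : List Int),
      e ∉ a →
      runAbsA e (a.length + f) v (a ++ q)
        = runAbsA e f (procA v a).1 (q ++ (procA v a).2.reverse) := by
  intro a
  induction a with
  | nil => intro f v q _; simp [procA]
  | cons c a ih =>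
    intro f v q he
    have hc : c ≠ e := fun h => he (h ▸ List.mem_cons_self)
    have h1 : runAbsA e ((c :: a).length + f) v ((c :: a) ++ q)
        = runAbsA e (a.length + f) (stepA v [] c).1 ((a ++ q) ++ (stepA v [] c).2.reverse) := by
      have hlen : (c :: a).length + f = (a.length + f) + 1 := by
        simp [List.length_cons]; omega
      rw [hlen, List.cons_append]
      simp only [runAbsA, if_neg hc]
    rw [h1, List.append_assoc, ih _ _ _ (fun h => he (List.mem_cons_of_mem _ h))]
    have hpA : procA v (c :: a)
        = ((procA (stepA v [] c).1 a).1, (procA (stepA v [] c).1 a).2 ++ (stepA v [] c).2) := by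
      show (a.foldl (fun st c => stepA st.1 st.2 c) (stepA v [] c)) = _
      rw [show stepA v [] c = ((stepA v [] c).1, (stepA v [] c).2) from rfl]
      exact procA_acc a _ _
    rw [hpA]
    simp [List.append_assoc]

lemma pyIdx_toNat (c : Int) (hc : 0 ≤ c) : pyIdx c = c.toNat := by
  unfold pyIdx; rw [if_neg (by omega)]

lemma mainSim (e : Int) :
    ∀ (n fA fB : Nat) (d : Int) (vA : Array Int) (vB : Array Nat) (fr : List Int),
      Zc vA ≤ n → 0 ≤ d →
      vA.size = 1000001 → vB.size = 1000001 →
      (∀ j, j < 1000001 → (vA.getD j 0 = 0 ↔ vB.getD j 0 = 0)) →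
      (∀ c ∈ fr, pyIdx c < 1000001 ∧ vA.getD (pyIdx c) 0 = d + 1) →
      2 * Zc vA + fr.length + 1 ≤ fA → Zc vA + 2 ≤ fB →
      runAbsA e fA vA fr = runB e fB vB d fr := by
  intro n
  induction n using Nat.strong_induction_on with
  | _ n ih =>
    intro fA fB d vA vB fr hZn hd hsA hsB hpat hfr hfA hfB
    obtain ⟨fA', rfl⟩ : ∃ fA', fA = fA' + 1 := ⟨fA - 1, by omega⟩
    obtain ⟨fB', rfl⟩ : ∃ fB', fB = fB' + 1 := ⟨fB - 1, by omega⟩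
    rcases fr with _ | ⟨c0, fr0⟩
    · simp [runAbsA, runB]
    · set fr := c0 :: fr0 with hfrdef
      have hfrne : fr ≠ [] := by simp [hfrdef]
      by_cases hmem : e ∈ fr
      · -- A pops e within this level; B sees it in the frontier
        have hrB : runB e (fB' + 1) vB d fr = some d := by
          simp only [runB, if_neg hfrne, if_pos hmem]
        rw [hrB]
        obtain ⟨a, b, hsplit, hea⟩ := List.eq_append_cons_of_mem hmem
        have hlen : a.length + 1 ≤ fr.length := by
          rw [hsplit]; simp
        obtain ⟨f2, hf2⟩ : ∃ f2, fA' + 1 = a.length + (f2 + 1) :=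
          ⟨fA' - a.length, by omega⟩
        obtain ⟨_, _, _, _, pres, _, _⟩ :=
          levelJoint d hd a vA vB hsA hsB hpat
            (fun c' hc' => hfr c' (by rw [hsplit]; exact List.mem_append_left _ hc'))
        have hlabel : vA.getD (pyIdx e) 0 = d + 1 := (hfr e hmem).2
        have hlabel' : (procA vA a).1.getD (pyIdx e) 0 = d + 1 := by
          rw [pres (pyIdx e) (by rw [hlabel]; omega)]; exact hlabel
        rw [hsplit, hf2, runAbsA_consume e a (f2 + 1) vA (e :: b) hea]
        show (if e = e then some ((procA vA a).1.getD (pyIdx e) 0 - 1) else _) = some d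
        rw [if_pos rfl, hlabel']
        congr 1
        omega
      · -- both sides advance one whole level
        have hrB : runB e (fB' + 1) vB d fr
            = runB e fB' (markAll vB (nextCand fr)).1 (d + 1) (markAll vB (nextCand fr)).2 := by
          simp only [runB, if_neg hfrne, if_neg hmem]
        obtain ⟨f2, hf2⟩ : ∃ f2, fA' + 1 = fr.length + f2 ∧ 2 * Zc vA + 1 ≤ f2 := by
          refine ⟨fA' + 1 - fr.length, by omega, by omega⟩
        obtain ⟨hch2, hsA', hsB', hpat', pres, hchinv, hZeq⟩ :=
          levelJoint d hd fr vA vB hsA hsB hpat hfr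
        have hcons : runAbsA e (fA' + 1) vA fr
            = runAbsA e f2 (procA vA fr).1 ((procA vA fr).2.reverse) := by
          have := runAbsA_consume e fr f2 vA [] hmem
          rw [List.append_nil] at this
          rw [hf2.1, this, List.nil_append]
        rw [hcons, hrB, ← hch2]
        by_cases hch : (procA vA fr).2 = []
        · rw [hch]
          obtain ⟨f3, rfl⟩ : ∃ f3, f2 = f3 + 1 := ⟨f2 - 1, by omega⟩
          obtain ⟨f4, rfl⟩ : ∃ f4, fB' = f4 + 1 := ⟨fB' - 1, by omega⟩
          rfl
        · have hchlen : 1 ≤ (procA vA fr).2.length := by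
            cases h : (procA vA fr).2 with
            | nil => exact absurd h hch
            | cons x xs => simp
          have hZlt : Zc (procA vA fr).1 < n := by omega
          apply ih (Zc (procA vA fr).1) hZlt f2 fB' (d + 1) _ _ _ (le_refl _) (by omega)
            hsA' hsB' hpat' ?_ ?_ ?_
          · intro c hc
            rw [List.mem_reverse] at hc
            obtain ⟨h1, h2, h3⟩ := hchinv c hc
            have hpy : pyIdx c = c.toNat := pyIdx_toNat c (by omega)
            constructor
            · rw [hpy]; omega
            · rw [hpy, h3]; ring
          · rw [List.length_reverse]; omega
          · omega

-- ===== VERDICT (by name: the statement is the Claim_ definition above) =====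
theorem bfs_spec : Claim_equal_bfs := by
  intro s e _ hpre
  obtain ⟨hs1, hs2⟩ := hpre
  show bfs s e = bfs_alt s e
  set v0 := (Array.replicate 1000001 (0 : Int)).setIfInBounds (pyIdx s) 1 with hv0
  set w0 := (Array.replicate 1000001 (0 : Nat)).setIfInBounds (pyIdx s) 1 with hw0
  have hrep : ∀ j, j < 1000001 → (Array.replicate 1000001 (0 : Int)).getD j 0 = 0 := by
    intro j hj
    rw [Array.getD_eq_getD_getElem?, Array.getElem?_replicate, if_pos hj]
    rfl
  have hrepN : ∀ j, j < 1000001 → (Array.replicate 1000001 (0 : Nat)).getD j 0 = 0 := by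
    intro j hj
    rw [Array.getD_eq_getD_getElem?, Array.getElem?_replicate, if_pos hj]
    rfl
  have hpy : pyIdx s < 1000001 := by
    unfold pyIdx; split <;> omega
  have hsz : v0.size = 1000001 := by
    rw [hv0, Array.size_setIfInBounds, Array.size_replicate]
  have hszN : w0.size = 1000001 := by
    rw [hw0, Array.size_setIfInBounds, Array.size_replicate]
  have hZrep : Zc (Array.replicate 1000001 (0 : Int)) = 1000001 := by
    unfold Zc
    rw [Finset.filter_true_of_mem (fun j hj => hrep j (Finset.mem_range.1 hj)), Finset.card_range]
  have hZ0 : Zc v0 = 1000000 := by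
    have := Zc_set (Array.replicate 1000001 (0 : Int)) (pyIdx s) hpy
      (Array.size_replicate) (hrep _ hpy) 1 one_ne_zero
    rw [← hv0] at this
    omega
  have hlab : v0.getD (pyIdx s) 0 = 1 := by
    rw [hv0, getD_setIfInBounds, if_pos ⟨rfl, by rw [Array.size_replicate]; exact hpy⟩]
  have hpat : ∀ j, j < 1000001 → (v0.getD j 0 = 0 ↔ w0.getD j 0 = 0) := by
    intro j hj
    rw [hv0, hw0, getD_setIfInBounds, getD_setIfInBounds, Array.size_replicate, Array.size_replicate]
    by_cases hjj : pyIdx s = j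
    · rw [if_pos ⟨hjj, hjj ▸ hpy⟩, if_pos ⟨hjj, hjj ▸ hpy⟩]
      simp
    · rw [if_neg (by simp [hjj]), if_neg (by simp [hjj]), hrep j hj, hrepN j hj]
      simp
  have h1 : bfs s e = runAbsA e 2000003 v0 [s] := by
    unfold bfs
    rw [runA_eq_runAbsA]
    rfl
  have h2 : bfs_alt s e = runB e 1000002 w0 0 [s] := rfl
  rw [h1, h2]
  apply mainSim e (Zc v0) 2000003 1000002 0 v0 w0 [s] (le_refl _) (by omega) hsz hszN
    hpat ?_ (by rw [hZ0]; simp) (by omega)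
  intro c hc
  have : c = s := by simpa using hc
  subst this
  exact ⟨hpy, by rw [hlab]; norm_num⟩
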